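-- pv_equiv track=rewrite | github.com/autogoal/autogoal | autogoal/datasets/ehealthkd20/_tools.py | _compute_sentence_offset
-- ===== SOURCE A (Python) =====
-- def _compute_sentence_offset(sentences):
--     sentences_offset = [-1]
--
--     for s in sentences:
--         prev = sentences_offset[-1]
--         start = prev + 1
--         end = start + len(s)
--         sentences_offset.append(end)
--
--     sentences_offset.pop(0)
--     return sentences_offset
-- ===== SOURCE B (Python) =====
-- def _compute_sentence_offset(sentences):
--     # Back-to-front: precompute the total document length (sentences joined by a
--     # 1-char separator), then walk the sentences in reverse, emitting each end
--     # offset and stepping the running end backwards; reverse at the end.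
--     out = []
--     end = sum(len(s) for s in sentences) + len(sentences) - 1
--     for s in reversed(sentences):
--         out.append(end)
--         end -= len(s) + 1
--     out.reverse()
--     return out
-- ===== Notes on version B (the rewrite author's own statement) =====
-- stated objective: alternative
-- what changed: Builds the output back-to-front: first computes the total joined length in one summing pass, then traverses the sentences in reverse, emitting each end offset while subtracting len(s)+1, and reverses the result — no self-referential accumulator list, no [-1] read, no pop.
import Mathlib
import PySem

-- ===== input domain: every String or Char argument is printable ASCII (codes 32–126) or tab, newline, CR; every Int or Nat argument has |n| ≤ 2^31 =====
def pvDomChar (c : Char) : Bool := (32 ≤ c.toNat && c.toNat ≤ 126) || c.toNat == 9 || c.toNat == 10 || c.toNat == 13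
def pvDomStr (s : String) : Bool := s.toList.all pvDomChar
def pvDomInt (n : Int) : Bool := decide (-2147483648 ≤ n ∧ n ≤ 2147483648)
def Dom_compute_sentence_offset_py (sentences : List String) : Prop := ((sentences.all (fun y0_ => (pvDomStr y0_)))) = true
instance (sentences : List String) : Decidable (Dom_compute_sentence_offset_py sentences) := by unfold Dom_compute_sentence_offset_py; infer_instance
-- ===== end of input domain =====

-- B builds the offsets back-to-front: it precomputes the total joined length, then walks the
-- sentences in reverse emitting each end offset, and reverses the result (objective: alternative).

-- ===== PORT A =====
-- the loop: append prev+1+len(s); acc is never empty, so getLastD (-1) is Python's sentences_offset[-1]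
def compute_sentence_offset_py (sentences : List String) : List Int :=
  let final := sentences.foldl
    (fun (acc : List Int) (s : String) =>
      let prev := acc.getLastD (-1)
      let start := prev + 1
      let «end» := start + (PySem.Str.len s : Int)
      acc ++ [«end»]) [-1]
  final.tail  -- .pop(0)

-- ===== PORT B =====
def compute_sentence_offset_py_alt (sentences : List String) : List Int :=
  -- end = sum(len(s) for s in sentences) + len(sentences) - 1
  let total : Int :=
    (sentences.foldl (fun (a : Int) (s : String) => a + (PySem.Str.len s : Int)) 0)
      + (sentences.length : Int) - 1
  -- for s in reversed(sentences): out.append(end); end -= len(s) + 1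
  let p := sentences.reverse.foldl
    (fun (st : List Int × Int) (s : String) =>
      (st.1 ++ [st.2], st.2 - ((PySem.Str.len s : Int) + 1))) ([], total)
  p.1.reverse  -- out.reverse(); return out

-- ===== PRECONDITION & SPEC =====
def Spec_compute_sentence_offset_py (sentences : List String) (out : List Int) : Prop := out = compute_sentence_offset_py_alt sentences
instance (sentences : List String) (out : List Int) : Decidable (Spec_compute_sentence_offset_py sentences out) := by unfold Spec_compute_sentence_offset_py; infer_instance

-- ===== CLAIM (what is proved, stated in full; the proofs are below) =====
def Claim_equal_compute_sentence_offset_py : Prop := ∀ (sentences : List String), Dom_compute_sentence_offset_py sentences → Spec_compute_sentence_offset_py sentences (compute_sentence_offset_py sentences)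

-- ===== LEMMAS AND PROOFS =====

-- closed-form sequence of end offsets starting from base
def pvEnds (base : Int) : List String → List Int
  | [] => []
  | s :: ss => (base + (PySem.Str.len s : Int)) :: pvEnds (base + (PySem.Str.len s : Int) + 1) ss

def pvW (ss : List String) : Int := ss.foldr (fun s a => (PySem.Str.len s : Int) + 1 + a) 0

theorem foldlA_eq (ss : List String) (L : List Int) :
    ss.foldl
      (fun (acc : List Int) (s : String) =>
        acc ++ [acc.getLastD (-1) + 1 + (PySem.Str.len s : Int)]) L
    = L ++ pvEnds (L.getLastD (-1) + 1) ss := by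
  induction ss generalizing L with
  | nil => simp [pvEnds]
  | cons s ss ih =>
    simp only [List.foldl_cons, pvEnds]
    rw [ih (L ++ [L.getLastD (-1) + 1 + (PySem.Str.len s : Int)])]
    simp only [List.getLastD_eq_getLast?, List.getLast?_concat, Option.getD_some,
      List.append_assoc, List.cons_append, List.nil_append]

theorem foldlB_eq (ss : List String) (acc : List Int) (e : Int) :
    ss.reverse.foldl
      (fun (st : List Int × Int) (s : String) =>
        (st.1 ++ [st.2], st.2 - ((PySem.Str.len s : Int) + 1))) (acc, e)
    = (acc ++ (pvEnds (e - pvW ss + 1) ss).reverse, e - pvW ss) := by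
  induction ss generalizing acc e with
  | nil => simp [pvW, pvEnds]
  | cons s ss ih =>
    simp only [List.reverse_cons, List.foldl_append, List.foldl_cons, List.foldl_nil]
    rw [ih acc e]
    have hW : pvW (s :: ss) = (PySem.Str.len s : Int) + 1 + pvW ss := rfl
    simp only [hW, pvEnds]
    have h2 : e - ((PySem.Str.len s : Int) + 1 + pvW ss) + 1 + (PySem.Str.len s : Int) + 1
        = e - pvW ss + 1 := by ring
    have h1 : e - ((PySem.Str.len s : Int) + 1 + pvW ss) + 1 + (PySem.Str.len s : Int)
        = e - pvW ss := by ring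
    have h3 : e - ((PySem.Str.len s : Int) + 1 + pvW ss)
        = e - pvW ss - ((PySem.Str.len s : Int) + 1) := by ring
    rw [h2, h1, h3]
    simp [List.append_assoc]

theorem sumlen_eq (ss : List String) :
    (ss.foldl (fun (a : Int) (s : String) => a + (PySem.Str.len s : Int)) 0)
      + (ss.length : Int) - 1 = pvW ss - 1 := by
  have : ∀ (ss : List String) (a : Int),
      ss.foldl (fun (a : Int) (s : String) => a + (PySem.Str.len s : Int)) a
        + (ss.length : Int) = a + pvW ss := by
    intro ss
    induction ss with
    | nil => intro a; simp [pvW]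
    | cons s ss ih =>
      intro a
      simp only [List.foldl_cons, List.length_cons, pvW, List.foldr_cons] at *
      push_cast
      have := ih (a + (PySem.Str.len s : Int))
      omega
  have h := this ss 0
  omega

theorem compute_sentence_offset_py_eq (ss : List String) :
    compute_sentence_offset_py ss = compute_sentence_offset_py_alt ss := by
  unfold compute_sentence_offset_py compute_sentence_offset_py_alt
  simp only []
  rw [foldlA_eq ss [-1], foldlB_eq ss [] (ss.foldl (fun (a : Int) (s : String) => a + (PySem.Str.len s : Int)) 0 + (ss.length : Int) - 1)]
  rw [sumlen_eq ss]
  simp only [List.getLastD_eq_getLast?, List.getLast?_singleton, Option.getD_some,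
    List.singleton_append, List.tail_cons, List.nil_append, List.reverse_reverse]
  norm_num

-- ===== VERDICT (by name: the statement is the Claim_ definition above) =====
theorem compute_sentence_offset_py_spec : Claim_equal_compute_sentence_offset_py := by
  intro ss _
  exact compute_sentence_offset_py_eq ss
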